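-- pv_equiv track=rewrite | github.com/RAGE-toolkit/RABV-gTK | scripts/CalcAlignmentCord.py | get_gap_ranges
-- ===== SOURCE A (Python) =====
-- def get_gap_ranges(sequence):
-- 	gap_ranges = []
-- 	start = None
--
-- 	for i, char in enumerate(sequence):
-- 		if char == '-':
-- 			if start is None:
-- 				start = i + 1  # Convert to 1-based indexing
-- 		else:
-- 			if start is not None:
-- 				gap_ranges.append([start, i])
-- 				start = None
--
-- 	if start is not None:
-- 		gap_ranges.append([start, len(sequence)])
--
-- 	return gap_ranges
-- ===== SOURCE B (Python) =====
-- def get_gap_ranges(sequence):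
--     gap_ranges = []
--     i = 0
--     n = len(sequence)
--     while i < n:
--         if sequence[i] != '-':
--             i += 1
--         else:
--             j = i + 1
--             while j < n and sequence[j] == '-':
--                 j += 1
--             gap_ranges.append([i + 1, j])
--             i = j
--     return gap_ranges
-- ===== Notes on version B (the rewrite author's own statement) =====
-- stated objective: alternative
-- what changed: Replaces A's per-character start/None state machine with run scanning: on meeting a gap character an inner loop consumes the whole run and its range is emitted at once, so no open-range state and no post-loop flush are needed.
import Mathlib
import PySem

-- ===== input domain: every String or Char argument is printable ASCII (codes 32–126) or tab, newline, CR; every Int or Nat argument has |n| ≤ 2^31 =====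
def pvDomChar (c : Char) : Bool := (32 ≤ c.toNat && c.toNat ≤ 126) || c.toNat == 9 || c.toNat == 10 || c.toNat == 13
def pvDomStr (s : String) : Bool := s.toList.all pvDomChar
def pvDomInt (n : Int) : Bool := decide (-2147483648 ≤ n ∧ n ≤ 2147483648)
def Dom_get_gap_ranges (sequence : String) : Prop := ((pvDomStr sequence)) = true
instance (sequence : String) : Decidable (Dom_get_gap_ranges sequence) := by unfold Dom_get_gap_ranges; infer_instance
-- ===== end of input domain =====

-- B replaces A's start/None state machine with run scanning (inner loop consumes each gap run); alternative decomposition, same cost.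

-- ===== PORT A =====
-- A's for-loop over enumerate(sequence), carried state: accumulator gap_ranges and start : Option Int;
-- at the end of the loop (i = len(sequence)) the open range, if any, is flushed.
def pvLoopA : List Char → Nat → List (List Int) → Option Int → List (List Int)
  | [], i, acc, start =>
      match start with
      | some s => acc ++ [[s, (i : Int)]]
      | none => acc
  | c :: cs, i, acc, start =>
      if c = '-' then
        match start with
        | none => pvLoopA cs (i + 1) acc (some ((i : Int) + 1))
        | some _ => pvLoopA cs (i + 1) acc start
      else
        match start with
        | some s => pvLoopA cs (i + 1) (acc ++ [[s, (i : Int)]]) none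
        | none => pvLoopA cs (i + 1) acc none

def get_gap_ranges (sequence : String) : List (List Int) :=
  pvLoopA sequence.toList 0 [] none

-- ===== PORT B =====
-- Source B's outer while loop: skip a non-gap char, or consume a whole gap run (the inner while loop,
-- ported as takeWhile/dropWhile on the remaining characters) and emit its 1-based range.
def pvLoopB : List Char → Nat → List (List Int)
  | [], _ => []
  | c :: cs, i =>
      if c = '-' then
        [((i : Int) + 1), ((i : Int) + 1 + (cs.takeWhile (· = '-')).length)]
          :: pvLoopB (cs.dropWhile (· = '-')) (i + 1 + (cs.takeWhile (· = '-')).length)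
      else
        pvLoopB cs (i + 1)
  termination_by l => l.length
  decreasing_by
    · simpa using Nat.lt_succ_of_le (cs.length_dropWhile_le _)
    · simp

def get_gap_ranges_alt (sequence : String) : List (List Int) :=
  pvLoopB sequence.toList 0

-- ===== PRECONDITION & SPEC =====
def Spec_get_gap_ranges (sequence : String) (out : List (List Int)) : Prop := out = get_gap_ranges_alt sequence
instance (sequence : String) (out : List (List Int)) : Decidable (Spec_get_gap_ranges sequence out) := by unfold Spec_get_gap_ranges; infer_instance

-- ===== CLAIM (what is proved, stated in full; the proofs are below) =====
def Claim_equal_get_gap_ranges : Prop := ∀ (sequence : String), Dom_get_gap_ranges sequence → Spec_get_gap_ranges sequence (get_gap_ranges sequence)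

-- ===== LEMMAS AND PROOFS =====

-- the accumulator of A's loop is a prefix of the result
theorem pvLoopA_acc (l : List Char) : ∀ (i : Nat) (acc : List (List Int)) (start : Option Int),
    pvLoopA l i acc start = acc ++ pvLoopA l i [] start := by
  induction l with
  | nil => intro i acc start; cases start <;> simp [pvLoopA]
  | cons c cs ih =>
      intro i acc start
      cases start with
      | none =>
          by_cases hc : c = '-'
          · simp only [pvLoopA, if_pos hc]; rw [ih]
          · simp only [pvLoopA, if_neg hc]; rw [ih]
      | some s =>
          by_cases hc : c = '-'
          · simp only [pvLoopA, if_pos hc]; rw [ih]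
          · simp only [pvLoopA, if_neg hc, List.nil_append]
            rw [ih, ih (i+1) ([[s, (i : Int)]])]
            simp

-- an open range passes unchanged through a run of gap characters
theorem pvLoopA_gaps (g : List Char) (hg : ∀ c ∈ g, c = '-') :
    ∀ (r : List Char) (i : Nat) (s : Int),
    pvLoopA (g ++ r) i [] (some s) = pvLoopA r (i + g.length) [] (some s) := by
  induction g with
  | nil => intro r i s; simp
  | cons c cs ih =>
      intro r i s
      have hc : c = '-' := hg c (by simp)
      have hcs : ∀ c ∈ cs, c = '-' := fun x hx => hg x (by simp [hx])
      simp only [List.cons_append, pvLoopA, if_pos hc]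
      rw [ih hcs]
      congr 1
      simp
      omega

-- main equivalence of the two loops
theorem pvLoop_eq (l : List Char) (i : Nat) : pvLoopA l i [] none = pvLoopB l i := by
  match l with
  | [] => simp [pvLoopA, pvLoopB]
  | c :: cs =>
    by_cases hc : c = '-'
    · have hg : ∀ x ∈ cs.takeWhile (· = '-'), x = '-' := by
        intro x hx; simpa using List.mem_takeWhile_imp hx
      have hsplit : cs = cs.takeWhile (· = '-') ++ cs.dropWhile (· = '-') :=
        (List.takeWhile_append_dropWhile).symm
      have key : pvLoopA cs (i + 1) [] (some ((i : Int) + 1))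
          = pvLoopA (cs.dropWhile (· = '-')) (i + 1 + (cs.takeWhile (· = '-')).length) []
              (some ((i : Int) + 1)) := by
        conv_lhs => rw [hsplit]
        rw [pvLoopA_gaps _ hg]
      simp only [pvLoopA, if_pos hc, pvLoopB]
      rw [key]
      rcases hr : cs.dropWhile (· = '-') with _ | ⟨d, ds⟩
      · simp only [pvLoopA, pvLoopB]
        have hcast : ((i + 1 + (List.takeWhile (fun x => decide (x = '-')) cs).length : Nat) : Int)
            = (i : Int) + 1 + ((List.takeWhile (fun x => decide (x = '-')) cs).length : Int) := by
          push_cast; ring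
        rw [hcast]; simp
      · have hd : ¬ d = '-' := by
          have h := List.head?_dropWhile_not (p := fun x => decide (x = '-')) (l := cs)
          rw [hr] at h
          simpa using h
        have hlen : ds.length + 1 ≤ cs.length := by
          have h2 := cs.length_dropWhile_le (fun x => decide (x = '-'))
          rw [hr] at h2
          simpa using h2
        simp only [pvLoopA, if_neg hd, pvLoopB]
        rw [pvLoopA_acc]
        rw [pvLoop_eq ds (i + 1 + (cs.takeWhile (· = '-')).length + 1)]
        have hcast : ((i + 1 + (List.takeWhile (fun x => decide (x = '-')) cs).length : Nat) : Int)
            = (i : Int) + 1 + ((List.takeWhile (fun x => decide (x = '-')) cs).length : Int) := by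
          push_cast; ring
        rw [hcast]; simp
    · simp only [pvLoopA, pvLoopB, if_neg hc]
      exact pvLoop_eq cs (i + 1)
  termination_by l.length

-- ===== VERDICT (by name: the statement is the Claim_ definition above) =====
theorem get_gap_ranges_spec : Claim_equal_get_gap_ranges := by
  intro s _
  unfold Spec_get_gap_ranges get_gap_ranges get_gap_ranges_alt
  exact pvLoop_eq s.toList 0
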